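-- pv_equiv track=rewrite | github.com/mozylee/algorithm | mozy/week1/programmers/prob42840.py | solution
-- ===== SOURCE A (Python) =====
-- def solution(answers):
--     scores = [0, 0, 0]
--     students = [[1, 3, 4, 5], [3, 1, 2, 4, 5]]
--     # student1: n%5+1, student2: n(짝: [1,3,4,5] 홀:2), student3...?
--     # 1: [1, 2, 3, 4, 5]
--     # 2: [2, 1, 2, 3, 2, 4, 2, 5]
--     # 3: [3, 3, 1, 1, 2, 2, 4, 4, 5, 5]
--
--     for i, answer in enumerate(answers):
--         if answer == i % 5 + 1:
--             scores[0] += 1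
--         if i % 2 == 0:
--             if answer == 2:
--                 scores[1] += 1
--         elif answer == students[0][int(i / 2) % 4]:
--             scores[1] += 1
--         if answer == students[1][int(i / 2) % 5]:
--             scores[2] += 1
--     return [i + 1 for i in range(3) if scores[i] == max(scores)]
-- ===== SOURCE B (Python) =====
-- PATTERNS = ([1, 2, 3, 4, 5],
--             [2, 1, 2, 3, 2, 4, 2, 5],
--             [3, 3, 1, 1, 2, 2, 4, 4, 5, 5])
-- CYCLE = 40  # lcm of the pattern periods 5, 8, 10
--
--
-- def solution(answers):
--     # histogram of (index mod 40, answer) pairs: the loop never looks at the patterns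
--     hist = {}
--     for key in ((i % CYCLE, a) for i, a in enumerate(answers)):
--         hist[key] = hist.get(key, 0) + 1
--     # each score is O(40) table lookups into the histogram, independent of len(answers)
--     scores = [sum(hist.get((r, p[r % len(p)]), 0) for r in range(CYCLE))
--               for p in PATTERNS]
--     m = max(scores)
--     return [k + 1 for k in range(3) if scores[k] == m]
-- ===== Notes on version B (the rewrite author's own statement) =====
-- stated objective: alternative
-- what changed: B first builds a histogram of (index mod 40, answer) pairs in a single pattern-blind pass, then computes each student's score as 40 histogram lookups along that student's periodic answer table (periods 5, 8, 10; lcm 40), instead of A's per-index arithmetic and even/odd branch comparisons inside the loop.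
import Mathlib
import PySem

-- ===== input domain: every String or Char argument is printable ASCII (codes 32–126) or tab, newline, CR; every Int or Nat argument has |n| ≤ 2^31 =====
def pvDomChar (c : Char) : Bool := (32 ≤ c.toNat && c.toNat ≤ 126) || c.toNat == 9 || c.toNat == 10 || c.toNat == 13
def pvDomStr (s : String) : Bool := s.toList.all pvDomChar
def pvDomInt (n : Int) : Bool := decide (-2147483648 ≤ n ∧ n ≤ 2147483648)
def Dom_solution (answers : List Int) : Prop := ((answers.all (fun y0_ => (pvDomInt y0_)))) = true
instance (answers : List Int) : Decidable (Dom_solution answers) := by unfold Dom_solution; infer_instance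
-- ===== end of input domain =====

-- B replaces A's in-loop per-index arithmetic/even-odd comparisons by a pattern-blind
-- histogram of (index mod 40, answer) pairs, scored afterwards by 40 table lookups per
-- student (alternative structure; same asymptotic cost).


-- ===== PORT A =====
-- one loop step of A: updates the triple of scores at index i with answer a
def pvStepA (s : Int × Int × Int) (p : Int × Int) : Int × Int × Int :=
  let i := p.1; let a := p.2
  ((if a = PySem.Int.mod i 5 + 1 then s.1 + 1 else s.1),
   (if PySem.Int.mod i 2 = 0 then (if a = 2 then s.2.1 + 1 else s.2.1)
    else (if a = ([1, 3, 4, 5] : List Int).getD (PySem.Int.mod (PySem.Int.floordiv i 2) 4).toNat 0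
          then s.2.1 + 1 else s.2.1)),
   (if a = ([3, 1, 2, 4, 5] : List Int).getD (PySem.Int.mod (PySem.Int.floordiv i 2) 5).toNat 0
    then s.2.2 + 1 else s.2.2))

def solution (answers : List Int) : List Int :=
  let scores := (PySem.List.enumerate answers).foldl pvStepA (0, 0, 0)
  let lst := [scores.1, scores.2.1, scores.2.2]
  let m := (PySem.List.max? lst (fun x => x)).getD 0
  (List.range 3).filterMap (fun i => if lst.getD i 0 = m then some ((i : Int) + 1) else none)

-- ===== PORT B =====
def pvPatterns : List (List Int) :=
  [[1, 2, 3, 4, 5], [2, 1, 2, 3, 2, 4, 2, 5], [3, 3, 1, 1, 2, 2, 4, 4, 5, 5]]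

-- the (index mod 40, answer) key stream of Source B's histogram loop
def pvKeys (answers : List Int) : List (Int × Int) :=
  (PySem.List.enumerate answers).map (fun q => (PySem.Int.mod q.1 40, q.2))

-- hist[key] = hist.get(key, 0) + 1 over the key stream
def pvHist (answers : List Int) : PySem.Dict (Int × Int) Int :=
  (pvKeys answers).foldl (fun d x => d.insert x (d.getD x 0 + 1)) PySem.Dict.empty

-- sum(hist.get((r, p[r % len(p)]), 0) for r in range(40))
def pvScoreB (answers : List Int) (p : List Int) : Int :=
  ((PySem.List.pyRange 0 40 1).map
    (fun r => (pvHist answers).getD (r, p.getD (PySem.Int.mod r (p.length : Int)).toNat 0) 0)).sum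

def solution_alt (answers : List Int) : List Int :=
  let scores := pvPatterns.map (pvScoreB answers)
  let m := (PySem.List.max? scores (fun x => x)).getD 0
  (List.range 3).filterMap (fun i => if scores.getD i 0 = m then some ((i : Int) + 1) else none)

-- ===== PRECONDITION & SPEC =====
def Spec_solution (answers : List Int) (out : List Int) : Prop := out = solution_alt answers
instance (answers : List Int) (out : List Int) : Decidable (Spec_solution answers out) := by unfold Spec_solution; infer_instance

-- ===== CLAIM (what is proved, stated in full; the proofs are below) =====
def Claim_equal_solution : Prop := ∀ (answers : List Int), Dom_solution answers → Spec_solution answers (solution answers)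

-- ===== LEMMAS AND PROOFS =====

-- pattern 1: i % 5 + 1 is exactly the periodic pattern [1,2,3,4,5]
lemma pv_e1 (i : Int) :
    PySem.Int.mod i 5 + 1 = ([1, 2, 3, 4, 5] : List Int).getD (PySem.Int.mod i 5).toNat 0 := by
  rw [PySem.Int.mod_eq_emod_of_pos (by norm_num : (0:Int) < 5)]
  have h : i % 5 = 0 ∨ i % 5 = 1 ∨ i % 5 = 2 ∨ i % 5 = 3 ∨ i % 5 = 4 := by omega
  rcases h with h | h | h | h | h <;> rw [h] <;> decide

-- pattern 2: A's even/odd split equals the periodic pattern [2,1,2,3,2,4,2,5]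
lemma pv_e2 (i : Int) :
    (if PySem.Int.mod i 2 = 0 then (2 : Int)
     else ([1, 3, 4, 5] : List Int).getD (PySem.Int.mod (PySem.Int.floordiv i 2) 4).toNat 0)
    = ([2, 1, 2, 3, 2, 4, 2, 5] : List Int).getD (PySem.Int.mod i 8).toNat 0 := by
  rw [PySem.Int.mod_eq_emod_of_pos (by norm_num : (0:Int) < 2),
      PySem.Int.mod_eq_emod_of_pos (by norm_num : (0:Int) < 8),
      PySem.Int.floordiv_eq_ediv_of_pos (by norm_num : (0:Int) < 2),
      PySem.Int.mod_eq_emod_of_pos (by norm_num : (0:Int) < 4)]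
  have h : i % 8 = 0 ∨ i % 8 = 1 ∨ i % 8 = 2 ∨ i % 8 = 3 ∨ i % 8 = 4 ∨ i % 8 = 5 ∨
      i % 8 = 6 ∨ i % 8 = 7 := by omega
  rcases h with h | h | h | h | h | h | h | h <;>
    · have h2 : i % 2 = i % 8 % 2 := by omega
      have h4 : i / 2 % 4 = i % 8 / 2 := by omega
      rw [h2, h4, h]; decide

-- pattern 3: A's [3,1,2,4,5] indexed by (i/2)%5 equals the periodic pattern [3,3,1,1,2,2,4,4,5,5]
lemma pv_e3 (i : Int) :
    ([3, 1, 2, 4, 5] : List Int).getD (PySem.Int.mod (PySem.Int.floordiv i 2) 5).toNat 0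
    = ([3, 3, 1, 1, 2, 2, 4, 4, 5, 5] : List Int).getD (PySem.Int.mod i 10).toNat 0 := by
  rw [PySem.Int.mod_eq_emod_of_pos (by norm_num : (0:Int) < 10),
      PySem.Int.floordiv_eq_ediv_of_pos (by norm_num : (0:Int) < 2),
      PySem.Int.mod_eq_emod_of_pos (by norm_num : (0:Int) < 5)]
  have h : i % 10 = 0 ∨ i % 10 = 1 ∨ i % 10 = 2 ∨ i % 10 = 3 ∨ i % 10 = 4 ∨ i % 10 = 5 ∨
      i % 10 = 6 ∨ i % 10 = 7 ∨ i % 10 = 8 ∨ i % 10 = 9 := by omega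
  rcases h with h | h | h | h | h | h | h | h | h | h <;>
    · have h5 : i / 2 % 5 = i % 10 / 2 := by omega
      rw [h5, h]; decide

-- one step of A equals one step of three periodic-pattern counters
lemma pv_step (s0 s1 s2 i a : Int) :
    pvStepA (s0, s1, s2) (i, a) =
      ((if a = ([1, 2, 3, 4, 5] : List Int).getD (PySem.Int.mod i 5).toNat 0 then s0 + 1 else s0),
       (if a = ([2, 1, 2, 3, 2, 4, 2, 5] : List Int).getD (PySem.Int.mod i 8).toNat 0 then s1 + 1 else s1),
       (if a = ([3, 3, 1, 1, 2, 2, 4, 4, 5, 5] : List Int).getD (PySem.Int.mod i 10).toNat 0 then s2 + 1 else s2)) := by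
  simp only [pvStepA]
  rw [pv_e1 i, ← pv_e2 i, pv_e3 i]
  by_cases h : (2:Int) ∣ i <;> simp [h]

-- A's fold over any list of (index, answer) pairs is the triple of periodic counters
lemma pv_fold (ps : List (Int × Int)) (s0 s1 s2 : Int) :
    ps.foldl pvStepA (s0, s1, s2) =
      (ps.foldl (fun c q => if q.2 = ([1, 2, 3, 4, 5] : List Int).getD (PySem.Int.mod q.1 5).toNat 0 then c + 1 else c) s0,
       ps.foldl (fun c q => if q.2 = ([2, 1, 2, 3, 2, 4, 2, 5] : List Int).getD (PySem.Int.mod q.1 8).toNat 0 then c + 1 else c) s1,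
       ps.foldl (fun c q => if q.2 = ([3, 3, 1, 1, 2, 2, 4, 4, 5, 5] : List Int).getD (PySem.Int.mod q.1 10).toNat 0 then c + 1 else c) s2) := by
  induction ps generalizing s0 s1 s2 with
  | nil => rfl
  | cons q t ih =>
      obtain ⟨i, a⟩ := q
      simp only [List.foldl_cons]
      rw [pv_step]
      exact ih _ _ _

-- a counting fold is s + countP
lemma pv_foldl_count (v : Int → Int) (ps : List (Int × Int)) (s : Int) :
    ps.foldl (fun c q => if q.2 = v q.1 then c + 1 else c) s
      = s + ((ps.countP (fun q => q.2 == v q.1)) : Int) := by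
  induction ps generalizing s with
  | nil => simp
  | cons q t ih =>
      simp only [List.foldl_cons, List.countP_cons]
      rw [ih]
      by_cases h : q.2 = v q.1 <;> simp [h] <;> ring

-- summed indicator over a duplicate-free list
lemma pv_ind (m a : Int) (v : Int → Int) (R : List Int) (hnd : R.Nodup) :
    (R.map (fun r => if m = r ∧ a = v r then (1 : Int) else 0)).sum
      = if m ∈ R ∧ a = v m then 1 else 0 := by
  induction R with
  | nil => simp
  | cons r t ih =>
      obtain ⟨hr, hnd'⟩ := List.nodup_cons.mp hnd
      by_cases hm : m = r
      · subst hm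
        have h0 : (t.map (fun r => if m = r ∧ a = v r then (1 : Int) else 0)).sum = 0 := by
          apply List.sum_eq_zero
          intro x hx
          obtain ⟨r', hr', hval⟩ := List.mem_map.mp hx
          have : ¬ (m = r' ∧ a = v r') := fun hc => hr (hc.1 ▸ hr')
          simp [this] at hval
          omega
        simp only [List.map_cons, List.sum_cons, h0]
        by_cases ha : a = v m <;> simp [ha]
      · have ht := ih hnd'
        simp only [List.map_cons, List.sum_cons, ht]
        have hne : ¬ (m = r ∧ a = v r) := fun hc => hm hc.1
        rw [if_neg hne]
        by_cases hmem : m ∈ t <;> by_cases ha : a = v m <;>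
          simp [hmem, ha, hm]

-- sums distribute over pointwise addition
lemma pv_sum_add (R : List Int) (f g : Int → Int) :
    (R.map (fun r => f r + g r)).sum = (R.map f).sum + (R.map g).sum := by
  induction R with
  | nil => simp
  | cons r t ih => simp only [List.map_cons, List.sum_cons, ih]; ring

-- counting each pattern slot in the key stream and summing over one full cycle
-- recovers the number of matches against the periodic pattern
lemma pv_sum_count (v : Int → Int) (ps : List (Int × Int)) :
    ((PySem.List.pyRange 0 40 1).map
        (fun r => (((ps.map (fun q => (PySem.Int.mod q.1 40, q.2))).count (r, v r)) : Int))).sum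
      = ((ps.countP (fun q => q.2 == v (PySem.Int.mod q.1 40))) : Int) := by
  induction ps with
  | nil => simp
  | cons q t ih =>
      have hmem : PySem.Int.mod q.1 40 ∈ PySem.List.pyRange 0 40 1 := by
        rw [PySem.List.mem_pyRange_one, PySem.Int.mod_eq_emod_of_pos (by norm_num : (0:Int) < 40)]
        omega
      have hcount : ∀ r : Int,
          ((((q :: t).map (fun q => (PySem.Int.mod q.1 40, q.2))).count (r, v r)) : Int)
          = (((t.map (fun q => (PySem.Int.mod q.1 40, q.2))).count (r, v r)) : Int)
            + (if PySem.Int.mod q.1 40 = r ∧ q.2 = v r then (1 : Int) else 0) := by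
        intro r
        simp only [List.map_cons]
        rw [List.count_cons]
        by_cases h : PySem.Int.mod q.1 40 = r ∧ q.2 = v r
        · have hb : ((PySem.Int.mod q.1 40, q.2) == (r, v r)) = true :=
            beq_iff_eq.mpr (Prod.ext h.1 h.2)
          rw [hb, if_pos h]
          push_cast
          norm_num
        · have hne : (PySem.Int.mod q.1 40, q.2) ≠ (r, v r) := fun hc =>
            h ⟨congrArg Prod.fst hc, congrArg Prod.snd hc⟩
          have hb : ((PySem.Int.mod q.1 40, q.2) == (r, v r)) = false :=
            beq_eq_false_iff_ne.mpr hne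
          rw [hb, if_neg h]
          push_cast
          norm_num
      have hsplit :
          ((PySem.List.pyRange 0 40 1).map
              (fun r => ((((q :: t).map (fun q => (PySem.Int.mod q.1 40, q.2))).count (r, v r)) : Int))).sum
          = ((PySem.List.pyRange 0 40 1).map
              (fun r => (((t.map (fun q => (PySem.Int.mod q.1 40, q.2))).count (r, v r)) : Int))).sum
            + ((PySem.List.pyRange 0 40 1).map
              (fun r => if PySem.Int.mod q.1 40 = r ∧ q.2 = v r then (1 : Int) else 0)).sum := by
        rw [← pv_sum_add]
        exact congrArg List.sum (List.map_congr_left (fun r _ => hcount r))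
      rw [hsplit, ih, pv_ind _ _ _ _ (PySem.List.nodup_pyRange_one 0 40), List.countP_cons]
      by_cases hq : q.2 = v (PySem.Int.mod q.1 40)
      · have hb : (q.2 == v (PySem.Int.mod q.1 40)) = true := beq_iff_eq.mpr hq
        rw [if_pos ⟨hmem, hq⟩, hb]
        push_cast
        norm_num
      · have hb : (q.2 == v (PySem.Int.mod q.1 40)) = false := beq_eq_false_iff_ne.mpr hq
        rw [if_neg (fun hc => hq hc.2), hb]
        push_cast
        norm_num

-- one score of B equals the corresponding periodic match-counting fold,
-- provided the pattern's period divides the 40-element cycle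
lemma pv_score_eq (answers pat : List Int)
    (hmod : ∀ i : Int, PySem.Int.mod (PySem.Int.mod i 40) (pat.length : Int)
              = PySem.Int.mod i (pat.length : Int)) :
    pvScoreB answers pat
      = (PySem.List.enumerate answers).foldl
          (fun c q => if q.2 = pat.getD (PySem.Int.mod q.1 (pat.length : Int)).toNat 0 then c + 1 else c) 0 := by
  have hgetD : ∀ x : Int × Int, (pvHist answers).getD x 0 = ((pvKeys answers).count x : Int) := by
    intro x
    rw [pvHist, PySem.Dict.getD_foldl_insert_add_one, PySem.Dict.getD_empty]
    ring
  rw [pvScoreB]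
  simp only [hgetD, pvKeys]
  rw [pv_sum_count (fun r => pat.getD (PySem.Int.mod r (pat.length : Int)).toNat 0),
      pv_foldl_count (fun i => pat.getD (PySem.Int.mod i (pat.length : Int)).toNat 0)]
  have hpred : (fun (q : Int × Int) =>
        q.2 == pat.getD (PySem.Int.mod (PySem.Int.mod q.1 40) (pat.length : Int)).toNat 0)
      = (fun (q : Int × Int) => q.2 == pat.getD (PySem.Int.mod q.1 (pat.length : Int)).toNat 0) := by
    funext q
    rw [hmod]
  rw [hpred]
  ring

-- the periods 5, 8, 10 all divide the 40-element cycle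
lemma pv_m5 (i : Int) : PySem.Int.mod (PySem.Int.mod i 40) 5 = PySem.Int.mod i 5 := by
  rw [PySem.Int.mod_eq_emod_of_pos (by norm_num : (0:Int) < 40),
      PySem.Int.mod_eq_emod_of_pos (by norm_num : (0:Int) < 5),
      PySem.Int.mod_eq_emod_of_pos (by norm_num : (0:Int) < 5)]
  omega

lemma pv_m8 (i : Int) : PySem.Int.mod (PySem.Int.mod i 40) 8 = PySem.Int.mod i 8 := by
  rw [PySem.Int.mod_eq_emod_of_pos (by norm_num : (0:Int) < 40),
      PySem.Int.mod_eq_emod_of_pos (by norm_num : (0:Int) < 8),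
      PySem.Int.mod_eq_emod_of_pos (by norm_num : (0:Int) < 8)]
  omega

lemma pv_m10 (i : Int) : PySem.Int.mod (PySem.Int.mod i 40) 10 = PySem.Int.mod i 10 := by
  rw [PySem.Int.mod_eq_emod_of_pos (by norm_num : (0:Int) < 40),
      PySem.Int.mod_eq_emod_of_pos (by norm_num : (0:Int) < 10),
      PySem.Int.mod_eq_emod_of_pos (by norm_num : (0:Int) < 10)]
  omega

-- ===== VERDICT (by name: the statement is the Claim_ definition above) =====
theorem solution_spec : Claim_equal_solution := by
  intro answers _
  show solution answers = solution_alt answers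
  have h1 := pv_score_eq answers [1, 2, 3, 4, 5]
    (by simpa using pv_m5)
  have h2 := pv_score_eq answers [2, 1, 2, 3, 2, 4, 2, 5]
    (by simpa using pv_m8)
  have h3 := pv_score_eq answers [3, 3, 1, 1, 2, 2, 4, 4, 5, 5]
    (by simpa using pv_m10)
  simp only [show (([1, 2, 3, 4, 5] : List Int).length : Int) = 5 from by norm_num] at h1
  simp only [show (([2, 1, 2, 3, 2, 4, 2, 5] : List Int).length : Int) = 8 from by norm_num] at h2
  simp only [show (([3, 3, 1, 1, 2, 2, 4, 4, 5, 5] : List Int).length : Int) = 10 from by norm_num] at h3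
  simp only [solution, solution_alt, pvPatterns, List.map]
  rw [pv_fold]
  simp only [h1, h2, h3]
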